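-- pv_equiv track=rewrite | github.com/bretlowery/Spardaqus | spextral/core/utils.py | containsdupevalues
-- ===== SOURCE A (Python) =====
-- def containsdupevalues(structure):
--     """Returns True if the passed dict has duplicate items/values, False otherwise. If the passed structure is not a dict, returns None."""
--     if isinstance(structure, dict):
--         # fast check for dupe keys
--         rev_dict = {}
--         for key, value in structure.items():
--             rev_dict.setdefault(value, set()).add(key)
--         dupes = list(filter(lambda x: len(x) > 1, rev_dict.values()))
--         if dupes:
--             return True
--         else:
--             return False
--     return None
-- ===== SOURCE B (Python) =====
-- def containsdupevalues(structure):
--     """Returns True if the passed dict has duplicate items/values, False otherwise. If the passed structure is not a dict, returns None."""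
--     if isinstance(structure, dict):
--         values = list(structure.values())
--         return len(set(values)) != len(values)
--     return None
-- ===== Notes on version B (the rewrite author's own statement) =====
-- stated objective: simpler
-- what changed: Replaces the reverse-map grouping loop (value -> set of keys, then filtering for multi-key buckets) with a direct cardinality comparison: duplicates exist iff the set of values is smaller than the list of values.
import Mathlib
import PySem

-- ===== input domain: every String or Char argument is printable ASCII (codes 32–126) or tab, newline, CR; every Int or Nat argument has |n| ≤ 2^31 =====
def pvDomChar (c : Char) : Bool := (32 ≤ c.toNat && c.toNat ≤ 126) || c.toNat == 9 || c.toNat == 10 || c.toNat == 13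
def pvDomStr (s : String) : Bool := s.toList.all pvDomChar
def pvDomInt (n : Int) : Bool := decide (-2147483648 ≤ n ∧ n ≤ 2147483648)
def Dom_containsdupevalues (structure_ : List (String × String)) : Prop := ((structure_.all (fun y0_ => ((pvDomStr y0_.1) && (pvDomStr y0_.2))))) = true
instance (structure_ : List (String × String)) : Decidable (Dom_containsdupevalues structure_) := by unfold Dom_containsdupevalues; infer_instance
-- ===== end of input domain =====

-- B replaces A's reverse-map grouping (value -> set of keys, filtered for multi-key buckets)
-- with a direct cardinality comparison len(set(values)) != len(values); same O(n) cost, simpler.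


-- ===== PORT A =====
-- the typed argument is always a dict, so the isinstance guard is always taken (the 'return None' branch is unreachable)
def containsdupevalues (structure_ : List (String × String)) : Option Bool :=
  -- for key, value in structure.items(): rev_dict.setdefault(value, set()).add(key)
  let rev_dict : PySem.Dict String (PySem.Set String) :=
    structure_.foldl
      (fun d kv => d.modify kv.2 PySem.Set.empty (fun s => PySem.Set.add s kv.1))
      PySem.Dict.empty
  let dupes := rev_dict.values.filter (fun x => 1 < PySem.Set.len x)
  if dupes ≠ [] then some true else some false

-- ===== PORT B =====
def containsdupevalues_alt (structure_ : List (String × String)) : Option Bool :=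
  let values := structure_.map (·.2)
  some (decide ((PySem.Set.ofList values).length ≠ values.length))

-- ===== PRECONDITION & SPEC =====
-- Pre_ excludes association lists with duplicate keys: those do not encode a Python dict
-- (building the dict would collapse them), so the ports' behaviour there corresponds to no Python input.
def Pre_containsdupevalues (structure_ : List (String × String)) : Prop :=
  (structure_.map Prod.fst).Nodup
instance (structure_ : List (String × String)) : Decidable (Pre_containsdupevalues structure_) := by unfold Pre_containsdupevalues; infer_instance

def pvWitness_containsdupevalues : (List (String × String)) := [("a", "x"), ("b", "x")]

def Spec_containsdupevalues (structure_ : List (String × String)) (out : Option Bool) : Prop := out = containsdupevalues_alt structure_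
instance (structure_ : List (String × String)) (out : Option Bool) : Decidable (Spec_containsdupevalues structure_ out) := by unfold Spec_containsdupevalues; infer_instance

-- ===== CLAIM (what is proved, stated in full; the proofs are below) =====
def Claim_equal_containsdupevalues : Prop := ∀ (structure_ : List (String × String)), Dom_containsdupevalues structure_ → Pre_containsdupevalues structure_ → Spec_containsdupevalues structure_ (containsdupevalues structure_)

-- ===== LEMMAS AND PROOFS =====

-- the reverse dict's bucket at v collects the keys of the pairs whose value is v
lemma rev_getD (l : List (String × String)) (d : PySem.Dict String (PySem.Set String)) (v : String) :
    (l.foldl (fun d kv => d.modify kv.2 PySem.Set.empty (fun s => PySem.Set.add s kv.1)) d).getD v PySem.Set.empty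
      = PySem.Set.update (d.getD v PySem.Set.empty) ((l.filter (fun p => p.2 == v)).map Prod.fst) := by
  induction l generalizing d with
  | nil => simp [PySem.Set.update_nil]
  | cons p l ih =>
    simp only [List.foldl_cons, ih, List.filter_cons]
    by_cases h : p.2 = v
    · simp [h, PySem.Dict.getD_modify_self, PySem.Set.update_cons]
    · have hb : (p.2 == v) = false := by simp [h]
      rw [PySem.Dict.getD_modify_of_ne _ _ _ (Ne.symm h)]
      simp [hb]

-- with distinct keys, the bucket at v has exactly (values.count v) elements
lemma bucket_count (l : List (String × String)) (hk : (l.map Prod.fst).Nodup) (v : String) :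
    ((l.foldl (fun d kv => d.modify kv.2 PySem.Set.empty (fun s => PySem.Set.add s kv.1))
        (PySem.Dict.empty : PySem.Dict String (PySem.Set String))).getD v PySem.Set.empty).length
      = (l.map Prod.snd).count v := by
  rw [rev_getD, PySem.Dict.getD_empty, PySem.Set.update_empty]
  have hnd : ((l.filter (fun p => p.2 == v)).map Prod.fst).Nodup :=
    (List.filter_sublist.map Prod.fst).nodup hk
  rw [PySem.Set.ofList_eq_self_of_nodup _ hnd]
  simp [List.count_eq_countP, List.countP_map, Function.comp_def, ← List.countP_eq_length_filter]

-- the set of values keeps its full length iff the values are pairwise distinct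
lemma ofList_length_eq_iff (vals : List String) :
    (PySem.Set.ofList vals).length = vals.length ↔ vals.Nodup := by
  constructor
  · intro h
    have hperm : (PySem.Set.ofList vals).Perm vals.dedup := by
      rw [List.perm_ext_iff_of_nodup (PySem.Set.nodup_ofList vals) vals.nodup_dedup]
      intro a; simp [PySem.Set.mem_ofList, List.mem_dedup]
    have hlen : vals.dedup.length = vals.length := by rw [← hperm.length_eq, h]
    have heq := (List.dedup_sublist vals).eq_of_length hlen
    exact heq ▸ vals.nodup_dedup
  · intro h; rw [PySem.Set.ofList_eq_self_of_nodup _ h]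

lemma B_char (l : List (String × String)) :
    containsdupevalues_alt l = some (decide (¬ (l.map Prod.snd).Nodup)) := by
  simp only [containsdupevalues_alt, Option.some.injEq, decide_eq_decide]
  exact not_congr (ofList_length_eq_iff _)

lemma A_char (l : List (String × String)) (hk : (l.map Prod.fst).Nodup) :
    containsdupevalues l = some (decide (¬ (l.map Prod.snd).Nodup)) := by
  simp only [containsdupevalues]
  have hkeysnd : (l.foldl (fun d kv => d.modify kv.2 PySem.Set.empty (fun s => PySem.Set.add s kv.1))
      (PySem.Dict.empty : PySem.Dict String (PySem.Set String))).keys.Nodup :=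
    PySem.Dict.nodup_keys_foldl_modify_key l Prod.snd PySem.Set.empty
      (fun _ kv s => PySem.Set.add s kv.1) PySem.Dict.empty (by simp [PySem.Dict.keys_empty])
  set rev := l.foldl (fun d kv => d.modify kv.2 PySem.Set.empty (fun s => PySem.Set.add s kv.1))
      (PySem.Dict.empty : PySem.Dict String (PySem.Set String)) with hrev
  have hempty : (rev.values.filter (fun x => 1 < PySem.Set.len x) = []) ↔ (l.map Prod.snd).Nodup := by
    rw [List.filter_eq_nil_iff]
    rw [PySem.Dict.values_eq_map_keys rev hkeysnd PySem.Set.empty]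
    have hkeys : rev.keys = PySem.Set.ofList (l.map Prod.snd) := by
      rw [hrev, PySem.Dict.keys_foldl_modify_key l Prod.snd PySem.Set.empty
        (fun _ kv s => PySem.Set.add s kv.1) PySem.Dict.empty]
      simp [PySem.Dict.keys_empty, PySem.Set.update_nil_left]
    constructor
    · intro h
      rw [List.nodup_iff_count_le_one]
      intro v
      by_cases hv : v ∈ (l.map Prod.snd)
      · have hm : v ∈ rev.keys := by rw [hkeys]; exact (PySem.Set.mem_ofList _ _).mpr hv
        have hmem : rev.getD v PySem.Set.empty ∈ rev.keys.map (fun k => rev.getD k PySem.Set.empty) :=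
          List.mem_map.mpr ⟨v, hm, rfl⟩
        have hlt := h _ hmem
        have hc := bucket_count l hk v
        rw [← hrev] at hc
        simp only [PySem.Set.len, decide_eq_true_eq, not_lt] at hlt
        omega
      · simp [List.count_eq_zero_of_not_mem hv]
    · intro h a ha
      rw [List.mem_map] at ha
      obtain ⟨k, hkmem, rfl⟩ := ha
      have hc := bucket_count l hk k
      rw [← hrev] at hc
      have hcount : (l.map Prod.snd).count k ≤ 1 := List.nodup_iff_count_le_one.mp h k
      simp only [PySem.Set.len, decide_eq_true_eq, not_lt]
      omega
  by_cases hdup : (l.map Prod.snd).Nodup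
  · rw [if_neg (not_not_intro (hempty.mpr hdup))]
    simp [hdup]
  · rw [if_pos (fun hnil => hdup (hempty.mp hnil))]
    simp [hdup]

-- ===== VERDICT (by name: the statement is the Claim_ definition above) =====
theorem containsdupevalues_spec : Claim_equal_containsdupevalues := by
  intro l _ hpre
  unfold Spec_containsdupevalues
  rw [A_char l hpre, B_char l]
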